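-- pv_equiv track=rewrite | github.com/TrueFinal/ACAD_Software | ACAD_v1_3b.py | procurar_valor
-- ===== SOURCE A (Python) =====
-- def duplicados(lista, valor, tipo):
-- 	if len(lista) == 0:
-- 		return False
-- 	else:
-- 		if tipo == 0:
-- 			for i in range(len(lista)):
-- 				if i % 2 == 0:
-- 					if int(lista[i]) == valor:
-- 						return True
-- 		if tipo == 1:
-- 			for i in range(0, len(lista), 6):
-- 				if int(lista[i]) == valor:
-- 					return True
--
-- 		if tipo == 2:
-- 			for i in range(len(lista)):
-- 				if int(lista[i]) == valor:
-- 					return True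
--
-- 		return False
--
-- def procurar_valor(lista, valor, tipo):
-- 	if duplicados(lista, valor, tipo) == True:
-- 		if tipo == 0:
-- 			for i in range(0, len(lista), 2):
-- 				if i % 2 == 0:
-- 					if int(lista[i]) == valor:
-- 						return i
-- 		if tipo == 1:
-- 			for i in range(0, len(lista), 6):
-- 				if lista[i] == valor:
-- 					return i
--
-- 		if tipo == 2:
-- 			for i in range(len(lista)):
-- 				if lista[i] == valor:
-- 					return i
--
-- 	return 0
-- ===== SOURCE B (Python) =====
-- def procurar_valor(lista, valor, tipo):
--     if tipo == 0:
--         for i in range(0, len(lista), 2):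
--             if int(lista[i]) == valor:
--                 return i
--     return 0
-- ===== Notes on version B (the rewrite author's own statement) =====
-- stated objective: simpler
-- what changed: Replaces A's two-pass structure (an existence scan in the helper duplicados followed by a second index-returning scan per tipo) by one helper-free even-index scan for tipo 0 and a direct 'return 0' for every other tipo, where A's second loop compares the string lista[i] with the int valor and therefore always falls through to 0.
import Mathlib
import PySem

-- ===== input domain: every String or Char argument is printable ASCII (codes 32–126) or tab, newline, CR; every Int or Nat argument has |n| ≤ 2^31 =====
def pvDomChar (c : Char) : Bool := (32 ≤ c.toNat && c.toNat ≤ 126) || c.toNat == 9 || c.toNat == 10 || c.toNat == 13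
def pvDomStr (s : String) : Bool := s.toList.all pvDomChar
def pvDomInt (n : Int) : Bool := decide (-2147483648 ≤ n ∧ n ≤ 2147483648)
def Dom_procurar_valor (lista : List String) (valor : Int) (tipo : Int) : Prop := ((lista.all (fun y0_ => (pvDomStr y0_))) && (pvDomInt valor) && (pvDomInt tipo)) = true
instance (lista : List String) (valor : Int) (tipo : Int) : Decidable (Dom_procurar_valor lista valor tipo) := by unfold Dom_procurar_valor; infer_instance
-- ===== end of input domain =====

-- B (simpler): one helper-free even-index scan for tipo 0 and a direct 0 otherwise, replacing
-- A's existence scan (duplicados) followed by a second index-returning scan per tipo; on tipo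
-- 1/2 A's second loop compares str with int and always falls through to 0, which B reproduces.

-- ===== PORT A =====
-- duplicados, tipo 0 loop: 'for i in range(len(lista)): if i % 2 == 0: if int(lista[i]) == valor: return True'
-- (Option Bool: none = ValueError from int())
def pvDupT0 (lista : List String) (valor : Int) : List Int → Option Bool
  | [] => some false
  | i :: rest =>
    if PySem.Int.mod i 2 = 0 then
      match PySem.List.pyGet? lista i with
      | none => none
      | some s =>
        match PySem.Int.ofStr? s with
        | none => none
        | some n => if n = valor then some true else pvDupT0 lista valor rest
    else pvDupT0 lista valor rest

-- duplicados, tipo 1/2 loops: 'if int(lista[i]) == valor: return True'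
def pvDupScan (lista : List String) (valor : Int) : List Int → Option Bool
  | [] => some false
  | i :: rest =>
    match PySem.List.pyGet? lista i with
    | none => none
    | some s =>
      match PySem.Int.ofStr? s with
      | none => none
      | some n => if n = valor then some true else pvDupScan lista valor rest

def pvDuplicados (lista : List String) (valor : Int) (tipo : Int) : Option Bool :=
  if lista.length = 0 then some false
  else if tipo = 0 then pvDupT0 lista valor (PySem.List.pyRange 0 lista.length 1)
  else if tipo = 1 then pvDupScan lista valor (PySem.List.pyRange 0 lista.length 6)
  else if tipo = 2 then pvDupScan lista valor (PySem.List.pyRange 0 lista.length 1)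
  else some false

-- procurar_valor, tipo 0 loop: 'for i in range(0, len, 2): if i % 2 == 0: if int(lista[i]) == valor: return i'
-- (0 on fall-through = the final 'return 0'; the int() ValueError path cannot fire when duplicados
-- returned True, its 0 is unreachable junk kept only to make the match total)
def pvFindT0 (lista : List String) (valor : Int) : List Int → Int
  | [] => 0
  | i :: rest =>
    if PySem.Int.mod i 2 = 0 then
      match PySem.List.pyGet? lista i with
      | none => 0
      | some s =>
        match PySem.Int.ofStr? s with
        | none => 0
        | some n => if n = valor then i else pvFindT0 lista valor rest
    else pvFindT0 lista valor rest

-- Python 'lista[i] == valor' compares a str with an int: always False (exact on every input)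
def pvStrEqInt (_s : String) (_v : Int) : Bool := false

-- procurar_valor, tipo 1/2 loops: 'if lista[i] == valor: return i'
def pvFindRaw (lista : List String) (valor : Int) : List Int → Int
  | [] => 0
  | i :: rest =>
    match PySem.List.pyGet? lista i with
    | none => 0
    | some s => if pvStrEqInt s valor then i else pvFindRaw lista valor rest

def procurar_valor (lista : List String) (valor : Int) (tipo : Int) : Int :=
  match pvDuplicados lista valor tipo with
  | some true =>
    if tipo = 0 then pvFindT0 lista valor (PySem.List.pyRange 0 lista.length 2)
    else if tipo = 1 then pvFindRaw lista valor (PySem.List.pyRange 0 lista.length 6)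
    else if tipo = 2 then pvFindRaw lista valor (PySem.List.pyRange 0 lista.length 1)
    else 0
  | _ => 0   -- some false → 'return 0'; none = ValueError propagates (excluded by Pre_)

-- ===== PORT B =====
-- 'for i in range(0, len(lista), 2): if int(lista[i]) == valor: return i' (tipo 0 only) / 'return 0'
-- (the two 'none' branches are IndexError (impossible for range indices) and ValueError (outside Pre_))
def pvAltScan (lista : List String) (valor : Int) : List Int → Int
  | [] => 0
  | i :: rest =>
    match PySem.List.pyGet? lista i with
    | none => 0
    | some s =>
      match PySem.Int.ofStr? s with
      | none => 0
      | some n => if n = valor then i else pvAltScan lista valor rest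

def procurar_valor_alt (lista : List String) (valor : Int) (tipo : Int) : Int :=
  if tipo = 0 then pvAltScan lista valor (PySem.List.pyRange 0 lista.length 2)
  else 0

-- ===== PRECONDITION & SPEC =====
-- the int value (if any) of element i: in range and int()-parseable
def pvIntAt (lista : List String) (i : Int) : Option Int :=
  (PySem.List.pyGet? lista i).bind PySem.Int.ofStr?

-- element i parses as an int and differs from valor
def pvGoodB (lista : List String) (valor : Int) (i : Int) : Bool :=
  (pvIntAt lista i).any (fun n => n != valor)

-- element i parses as an int
def pvParseB (lista : List String) (i : Int) : Bool :=
  (pvIntAt lista i).isSome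

-- every stride index whose strict stride predecessors all parse and miss valor must itself parse
-- (= int() never hits an unparseable string before the scan stops)
def pvOk (lista : List String) (valor : Int) (step : Int) : Prop :=
  ∀ i ∈ PySem.List.pyRange 0 lista.length step,
    (∀ j ∈ PySem.List.pyRange 0 lista.length step, j < i → pvGoodB lista valor j = true) →
    pvParseB lista i = true

-- Pre_ excludes exactly the inputs where A raises ValueError (int() on a non-integer string
-- reached before the first match on the tipo's stride); A returns on every other input.
def Pre_procurar_valor (lista : List String) (valor : Int) (tipo : Int) : Prop :=
  if tipo = 0 then pvOk lista valor 2
  else if tipo = 1 then pvOk lista valor 6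
  else if tipo = 2 then pvOk lista valor 1
  else True

instance (lista : List String) (valor : Int) (tipo : Int) : Decidable (Pre_procurar_valor lista valor tipo) := by
  unfold Pre_procurar_valor pvOk; infer_instance

def pvWitness_procurar_valor : List String × Int × Int := (["7", "x", "3"], 7, 0)

def Spec_procurar_valor (lista : List String) (valor : Int) (tipo : Int) (out : Int) : Prop := out = procurar_valor_alt lista valor tipo
instance (lista : List String) (valor : Int) (tipo : Int) (out : Int) : Decidable (Spec_procurar_valor lista valor tipo out) := by unfold Spec_procurar_valor; infer_instance

-- ===== CLAIM =====
def Claim_equal_procurar_valor : Prop := ∀ (lista : List String) (valor : Int) (tipo : Int), Dom_procurar_valor lista valor tipo → Pre_procurar_valor lista valor tipo → Spec_procurar_valor lista valor tipo (procurar_valor lista valor tipo)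

-- ===== LEMMAS AND PROOFS =====

-- pvFindRaw always falls through to 0 (str == int is always False)
lemma pvFindRaw_eq_zero (lista : List String) (valor : Int) :
    ∀ is : List Int, pvFindRaw lista valor is = 0 := by
  intro is
  induction is with
  | nil => rfl
  | cons i rest ih =>
    simp only [pvFindRaw, pvStrEqInt]
    cases PySem.List.pyGet? lista i <;> simp [ih]

-- A's tipo-0 existence loop = the plain scan over the even indices
lemma pvDupT0_eq_filter (lista : List String) (valor : Int) :
    ∀ is : List Int, pvDupT0 lista valor is
      = pvDupScan lista valor (is.filter (fun i => i % 2 == 0)) := by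
  intro is
  induction is with
  | nil => rfl
  | cons i rest ih =>
    have hm : PySem.Int.mod i 2 = i % 2 := PySem.Int.mod_eq_emod_of_pos (by norm_num)
    by_cases h : i % 2 = 0
    · have hb : (i % 2 == 0) = true := by simp [h]
      simp only [List.filter_cons, hb, if_true]
      simp only [pvDupT0, pvDupScan, hm, h, if_pos]
      cases hg : PySem.List.pyGet? lista i with
      | none => simp [hg]
      | some s =>
        cases hs : PySem.Int.ofStr? s with
        | none => simp [hg, hs]
        | some n => by_cases hn : n = valor <;> simp [hg, hs, hn, ih]
    · have hb : (i % 2 == 0) = false := by simp [h]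
      simp only [List.filter_cons, hb, Bool.false_eq_true, if_false]
      simp only [pvDupT0, hm, h, if_neg, if_false]
      exact ih

-- stride-2 range grows on the right by [n] exactly when n is even
lemma pvRange2_succ (n : Nat) :
    PySem.List.pyRange 0 ((n : Int) + 1) 2
      = PySem.List.pyRange 0 (n : Int) 2 ++ (if n % 2 = 0 then [(n : Int)] else []) := by
  rw [PySem.List.pyRange_of_pos 0 ((n : Int) + 1) (by norm_num),
      PySem.List.pyRange_of_pos 0 (n : Int) (by norm_num)]
  have h1 : (if (0:Int) < (n : Int) + 1 then (((n : Int) + 1 - 0 + 2 - 1) / 2).toNat else 0) = n / 2 + 1 := by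
    rw [if_pos (by positivity)]; omega
  have h2 : (if (0:Int) < (n : Int) then (((n : Int) - 0 + 2 - 1) / 2).toNat else 0) = (n + 1) / 2 := by
    split_ifs with h <;> omega
  rw [h1, h2]
  by_cases hp : n % 2 = 0
  · have he : n / 2 + 1 = (n + 1) / 2 + 1 := by omega
    rw [he, List.range_succ, List.map_append, if_pos hp]
    refine congrArg₂ _ rfl ?_
    simp only [List.map_cons, List.map_nil, List.cons.injEq, and_true]
    omega
  · have he : n / 2 + 1 = (n + 1) / 2 := by omega
    rw [he, if_neg hp, List.append_nil]

-- the even members of range(0, n) are range(0, n, 2)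
lemma pvFilter_range_even (n : Nat) :
    (PySem.List.pyRange 0 (n : Int) 1).filter (fun i => i % 2 == 0)
      = PySem.List.pyRange 0 (n : Int) 2 := by
  induction n with
  | zero => simp [PySem.List.pyRange]
  | succ m ih =>
    have hcast : ((m + 1 : Nat) : Int) = (m : Int) + 1 := by push_cast; ring
    rw [hcast, PySem.List.pyRange_one_succ_right (by positivity), List.filter_append, ih,
        pvRange2_succ]
    congr 1
    by_cases hp : m % 2 = 0
    · have h1 : ((m : Int) % 2 == 0) = true := by simp; omega
      simp [h1, hp]
    · have h1 : ((m : Int) % 2 == 0) = false := by simp; omega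
      simp [h1, hp]

-- positive-step ranges are strictly increasing
lemma pvRange_pairwise (b s : Int) (hs : 0 < s) :
    (PySem.List.pyRange 0 b s).Pairwise (· < ·) := by
  rw [PySem.List.pyRange_of_pos 0 b hs]
  refine List.Pairwise.map _ (fun k k' hk => ?_) (List.pairwise_lt_range)
  have : (k : Int) < (k' : Int) := by exact_mod_cast hk
  nlinarith

-- exhausted scan ⇒ the single-pass scan also falls through to 0
lemma pvDupScan_false_alt (lista : List String) (valor : Int) :
    ∀ is : List Int, pvDupScan lista valor is = some false → pvAltScan lista valor is = 0 := by
  intro is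
  induction is with
  | nil => intro; rfl
  | cons i rest ih =>
    intro h
    simp only [pvDupScan] at h
    simp only [pvAltScan]
    cases hg : PySem.List.pyGet? lista i with
    | none => simp [hg] at h
    | some s =>
      cases hs : PySem.Int.ofStr? s with
      | none => simp [hg, hs] at h
      | some n =>
        simp only [hg, hs] at h ⊢
        by_cases hn : n = valor
        · simp [hn] at h
        · simp only [hn, if_neg, if_false]
          exact ih (by simpa [hn] using h)

-- the precondition makes the existence scan exception-free
lemma pvOk_scan_ne_none (lista : List String) (valor : Int) :
    ∀ is : List Int, is.Pairwise (· < ·) →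
      (∀ i ∈ is, (∀ j ∈ is, j < i → pvGoodB lista valor j = true) → pvParseB lista i = true) →
      pvDupScan lista valor is ≠ none := by
  intro is
  induction is with
  | nil => intro _ _ h; simp [pvDupScan] at h
  | cons i rest ih =>
    intro hpw hok
    have hparse : pvParseB lista i = true := by
      refine hok i List.mem_cons_self (fun j hj hji => ?_)
      rcases List.mem_cons.mp hj with rfl | hj'
      · exact absurd hji (lt_irrefl _)
      · exact absurd hji (not_lt.mpr (le_of_lt ((List.pairwise_cons.mp hpw).1 j hj')))
    simp only [pvParseB, pvIntAt] at hparse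
    cases hg : PySem.List.pyGet? lista i with
    | none => simp [hg] at hparse
    | some s =>
      cases hs : PySem.Int.ofStr? s with
      | none => simp [hg, hs] at hparse
      | some n =>
        simp only [pvDupScan, hg, hs]
        by_cases hn : n = valor
        · simp [hn]
        · simp only [hn, if_neg, if_false]
          refine ih (List.pairwise_cons.mp hpw).2 (fun i' hi' hpre => ?_)
          refine hok i' (List.mem_cons_of_mem _ hi') (fun j hj hji => ?_)
          rcases List.mem_cons.mp hj with rfl | hj'
          · simp [pvIntAt, pvGoodB, hg, hs, hn]
          · exact hpre j hj' hji

-- on all-even index lists A's second tipo-0 loop is the single-pass scan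
lemma pvFindT0_eq_alt (lista : List String) (valor : Int) :
    ∀ is : List Int, (∀ i ∈ is, PySem.Int.mod i 2 = 0) →
      pvFindT0 lista valor is = pvAltScan lista valor is := by
  intro is
  induction is with
  | nil => intro; rfl
  | cons i rest ih =>
    intro hev
    have hi : PySem.Int.mod i 2 = 0 := hev i List.mem_cons_self
    have ih' := ih (fun j hj => hev j (List.mem_cons_of_mem _ hj))
    have hi' : i % 2 = 0 := by
      rwa [PySem.Int.mod_eq_emod_of_pos (by norm_num)] at hi
    cases hg : PySem.List.pyGet? lista i with
    | none => simp [pvFindT0, pvAltScan, hi', hg]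
    | some s =>
      cases hs : PySem.Int.ofStr? s with
      | none => simp [pvFindT0, pvAltScan, hi', hg, hs]
      | some n => by_cases hn : n = valor <;> simp [pvFindT0, pvAltScan, hi', hg, hs, hn, ih']

-- the tipo-0 case: A = B outright
lemma pv_case0 (lista : List String) (valor : Int) (hok : pvOk lista valor 2) :
    procurar_valor lista valor 0 = procurar_valor_alt lista valor 0 := by
  unfold procurar_valor procurar_valor_alt pvDuplicados
  by_cases hlen : lista.length = 0
  · simp [hlen, PySem.List.pyRange, pvAltScan]
  · simp only [hlen, if_false, if_true, reduceIte]
    rw [pvDupT0_eq_filter, pvFilter_range_even]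
    have heven : ∀ i ∈ PySem.List.pyRange 0 (lista.length : Int) 2, PySem.Int.mod i 2 = 0 := by
      intro i hi
      have := (PySem.List.mem_pyRange_iff_of_pos (by norm_num) i).mp hi
      rw [PySem.Int.mod_eq_zero_iff_dvd]
      simpa using this.2.2
    cases hd : pvDupScan lista valor (PySem.List.pyRange 0 (lista.length : Int) 2) with
    | none =>
      exact absurd hd (pvOk_scan_ne_none lista valor _ (pvRange_pairwise _ _ (by norm_num)) hok)
    | some b =>
      cases b with
      | false => rw [pvDupScan_false_alt lista valor _ hd]
      | true => exact pvFindT0_eq_alt lista valor _ heven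

-- the tipo-1/2 cases: under Pre_ A falls through to 0 = B
lemma pv_case12 (lista : List String) (valor : Int) (step : Int)
    (hs : 0 < step) (hok : pvOk lista valor step) :
    (match pvDupScan lista valor (PySem.List.pyRange 0 lista.length step) with
      | some true => pvFindRaw lista valor (PySem.List.pyRange 0 lista.length step)
      | _ => (0:Int)) = 0 := by
  cases hd : pvDupScan lista valor (PySem.List.pyRange 0 lista.length step) with
  | none =>
    exact absurd hd (pvOk_scan_ne_none lista valor _ (pvRange_pairwise _ _ hs) hok)
  | some b =>
    cases b with
    | false => rfl
    | true => exact pvFindRaw_eq_zero lista valor _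

-- ===== VERDICT =====
theorem procurar_valor_spec : Claim_equal_procurar_valor := by
  intro lista valor tipo _ hpre
  unfold Pre_procurar_valor at hpre
  unfold Spec_procurar_valor
  by_cases h0 : tipo = 0
  · subst h0; exact pv_case0 lista valor (by simpa using hpre)
  · by_cases h1 : tipo = 1
    · subst h1
      have := pv_case12 lista valor 6 (by norm_num) (by simpa using hpre)
      unfold procurar_valor procurar_valor_alt pvDuplicados
      by_cases hlen : lista.length = 0
      · simp [hlen]
      · simpa [hlen] using this
    · by_cases h2 : tipo = 2
      · subst h2
        have := pv_case12 lista valor 1 (by norm_num) (by simpa [h0, h1] using hpre)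
        unfold procurar_valor procurar_valor_alt pvDuplicados
        by_cases hlen : lista.length = 0
        · simp [hlen, h0, h1]
        · simpa [hlen, h0, h1] using this
      · unfold procurar_valor procurar_valor_alt pvDuplicados
        by_cases hlen : lista.length = 0 <;> simp [hlen, h0, h1, h2]
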